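-- pv_equiv track=rewrite | github.com/chreanzonaroth-debug/REDBLUETIEV1 | user.py | get_big_road_html
-- ===== SOURCE A (Python) =====
-- def get_big_road_html(history):
--     if not history: return ""
--     columns, current_col = [], [history[0]]
--     for i in range(1, len(history)):
--         if history[i] == history[i-1]: current_col.append(history[i])
--         else: columns.append(current_col); current_col = [history[i]]
--     columns.append(current_col)
--     html = '<div class="road-wrapper">'
--     for col in columns:
--         html += '<div class="road-column">'
--         for item in col: html += f'<div class="circle-{"p" if item == "P" else "b"}">{item}</div>'
--         html += '</div>'
--     html += '</div>'
--     return html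
-- ===== SOURCE B (Python) =====
-- def get_big_road_html(history):
--     if not history:
--         return ""
--     parts = ['<div class="road-wrapper"><div class="road-column">']
--     for prev, cur in zip(history, history[1:]):
--         parts.append(f'<div class="circle-{"p" if prev == "P" else "b"}">{prev}</div>')
--         if cur != prev:
--             parts.append('</div><div class="road-column">')
--     last = history[-1]
--     parts.append(f'<div class="circle-{"p" if last == "P" else "b"}">{last}</div>')
--     parts.append('</div></div>')
--     return ''.join(parts)
-- ===== Notes on version B (the rewrite author's own statement) =====
-- stated objective: alternative
-- what changed: Replaces A's two-pass state machine (build a list of column lists, then render them with nested appends) by a single streaming pass over adjacent pairs (zip) that emits cell divs and a column-break separator on each transition, joined at the end.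
import Mathlib
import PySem

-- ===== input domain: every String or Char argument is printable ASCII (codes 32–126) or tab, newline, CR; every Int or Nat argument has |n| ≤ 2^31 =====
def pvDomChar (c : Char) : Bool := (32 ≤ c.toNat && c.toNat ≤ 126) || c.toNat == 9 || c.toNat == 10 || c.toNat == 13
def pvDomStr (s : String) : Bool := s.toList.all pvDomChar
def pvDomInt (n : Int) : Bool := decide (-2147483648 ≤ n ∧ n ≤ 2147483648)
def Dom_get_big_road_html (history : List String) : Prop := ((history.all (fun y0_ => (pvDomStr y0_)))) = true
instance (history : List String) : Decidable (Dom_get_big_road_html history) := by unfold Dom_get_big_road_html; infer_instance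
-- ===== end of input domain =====

-- B replaces A's two-pass build-columns-then-render state machine by a single streaming
-- pass over adjacent pairs that emits a column break at each transition (objective: alternative).

-- ===== PORT A =====
def get_big_road_html (history : List String) : String :=
  match history with
  | [] => ""
  | h0 :: _ =>
    let st := (PySem.List.pyRange 1 (PySem.List.len history) 1).foldl
      (fun (st : List (List String) × List String) i =>
        if PySem.List.pyGetD history i "" == PySem.List.pyGetD history (i-1) "" then
          (st.1, st.2 ++ [PySem.List.pyGetD history i ""])
        else
          (st.1 ++ [st.2], [PySem.List.pyGetD history i ""]))
      ([], [h0])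
    let columns := st.1 ++ [st.2]
    let html := columns.foldl
      (fun html col =>
        (col.foldl
          (fun html item =>
            html ++ ("<div class=\"circle-" ++ (if item == "P" then "p" else "b") ++ "\">" ++ item ++ "</div>"))
          (html ++ "<div class=\"road-column\">")) ++ "</div>")
      "<div class=\"road-wrapper\">"
    html ++ "</div>"

-- ===== PORT B =====
def get_big_road_html_alt (history : List String) : String :=
  match history with
  | [] => ""
  | _ :: _ =>
    let parts0 : List String := ["<div class=\"road-wrapper\"><div class=\"road-column\">"]
    let parts1 := (history.zip (PySem.List.slice history (some 1) none)).foldl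
      (fun (parts : List String) pc =>
        let parts := parts ++ ["<div class=\"circle-" ++ (if pc.1 == "P" then "p" else "b") ++ "\">" ++ pc.1 ++ "</div>"]
        if pc.2 != pc.1 then parts ++ ["</div><div class=\"road-column\">"] else parts)
      parts0
    let last := PySem.List.pyGetD history (-1) ""
    let parts2 := parts1 ++ ["<div class=\"circle-" ++ (if last == "P" then "p" else "b") ++ "\">" ++ last ++ "</div>"]
    let parts3 := parts2 ++ ["</div></div>"]
    PySem.Str.join "" parts3

-- ===== PRECONDITION & SPEC =====
def Spec_get_big_road_html (history : List String) (out : String) : Prop := out = get_big_road_html_alt history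
instance (history : List String) (out : String) : Decidable (Spec_get_big_road_html history out) := by unfold Spec_get_big_road_html; infer_instance

-- ===== CLAIM (what is proved, stated in full; the proofs are below) =====
def Claim_equal_get_big_road_html : Prop := ∀ (history : List String), Dom_get_big_road_html history → Spec_get_big_road_html history (get_big_road_html history)

-- ===== LEMMAS AND PROOFS =====

/-- One cell div, as both Pythons build it. -/
def pvCell (item : String) : String :=
  "<div class=\"circle-" ++ (if item == "P" then "p" else "b") ++ "\">" ++ item ++ "</div>"

def pvCells : List String → String
  | [] => ""
  | x :: xs => pvCell x ++ pvCells xs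

def pvRenderCols : List (List String) → String
  | [] => ""
  | c :: cs => "<div class=\"road-column\">" ++ (pvCells c ++ ("</div>" ++ pvRenderCols cs))

/-- The HTML emitted for the suffix starting at `prev`, up to (and incl.) the last column's close. -/
def pvTail : String → List String → String
  | prev, [] => pvCell prev ++ "</div>"
  | prev, x :: r =>
    if x == prev then pvCell prev ++ pvTail x r
    else pvCell prev ++ ("</div><div class=\"road-column\">" ++ pvTail x r)

/-- A's grouping loop, structurally. -/
def pvGo : List (List String) × List String → String → List String → List (List String) × List String
  | st, _, [] => st
  | st, prev, x :: rest =>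
    if x == prev then pvGo (st.1, st.2 ++ [x]) x rest else pvGo (st.1 ++ [st.2], [x]) x rest

def pvCat : List String → String
  | [] => ""
  | x :: xs => x ++ pvCat xs

theorem pvCat_append (a b : List String) : pvCat (a ++ b) = pvCat a ++ pvCat b := by
  induction a with
  | nil => simp [pvCat]
  | cons x xs ih => simp [pvCat, ih, String.append_assoc]

theorem pvCatToList (l : List String) : (pvCat l).toList = (l.map String.toList).flatten := by
  induction l with
  | nil => rfl
  | cons x xs ih => simp [pvCat, ih]

theorem pvCat_singleton (s : String) : pvCat [s] = s := by
  apply String.ext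
  rw [pvCatToList]
  simp

theorem pvJoinEq (l : List String) : PySem.Str.join "" l = pvCat l := by
  apply String.ext
  rw [pvCatToList]
  simp [PySem.Str.join, PySem.Chars.join, List.intercalate]
  induction l with
  | nil => rfl
  | cons x xs ih => cases xs <;> simp_all

theorem pvSepAssoc (X : String) :
    "</div>" ++ ("<div class=\"road-column\">" ++ X) = "</div><div class=\"road-column\">" ++ X := by
  rw [← String.append_assoc]
  congr 1

theorem pvWrapAssoc (X : String) :
    "<div class=\"road-wrapper\">" ++ ("<div class=\"road-column\">" ++ X)
      = "<div class=\"road-wrapper\"><div class=\"road-column\">" ++ X := by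
  rw [← String.append_assoc]
  congr 1

theorem pvCells_append (a : List String) (p : String) :
    pvCells (a ++ [p]) = pvCells a ++ pvCell p := by
  induction a with
  | nil => simp [pvCells]
  | cons x xs ih => simp [pvCells, ih, String.append_assoc]

theorem pvRenderCols_append (cs : List (List String)) (c : List String) :
    pvRenderCols (cs ++ [c]) = pvRenderCols cs ++ ("<div class=\"road-column\">" ++ (pvCells c ++ "</div>")) := by
  induction cs with
  | nil => simp [pvRenderCols]
  | cons d ds ih => simp [pvRenderCols, ih, String.append_assoc]

theorem pvGetLastAux (r : List String) : ∀ (x : String) (d : String),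
    (x :: r).getLast?.getD d = r.getLast?.getD x := by
  induction r with
  | nil => intro x d; rfl
  | cons y r ih =>
    intro x d
    rw [List.getLast?_cons_cons, ih y d, ih y x]

theorem pvLast (h0 : String) (rest : List String) :
    PySem.List.pyGetD (h0 :: rest) (-1) "" = rest.getLastD h0 := by
  simp [PySem.List.pyGetD, PySem.List.pyGet?_neg_one, pvGetLastAux]

theorem pvFoldIdx (xs : List String) (t : List String) :
    ∀ (j : Nat) (st : List (List String) × List String),
      j < xs.length → xs.drop (j+1) = t →
      (PySem.List.pyRange ((j : Int) + 1) (PySem.List.len xs) 1).foldl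
        (fun (st : List (List String) × List String) i =>
          if PySem.List.pyGetD xs i "" == PySem.List.pyGetD xs (i-1) "" then
            (st.1, st.2 ++ [PySem.List.pyGetD xs i ""])
          else
            (st.1 ++ [st.2], [PySem.List.pyGetD xs i ""])) st
      = pvGo st (xs.getD j "") t := by
  induction t with
  | nil =>
    intro j st hj hd
    have hlen : xs.length = j + 1 := by
      have := List.drop_eq_nil_iff.mp hd
      omega
    rw [PySem.List.len_eq, PySem.List.pyRange_one_eq_nil (by omega)]
    simp [pvGo]
  | cons x t' ih =>
    intro j st hj hd
    have hjlt : j + 1 < xs.length := by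
      have hlen := congrArg List.length hd
      simp at hlen
      omega
    have hx : xs[j+1]? = some x := by
      have h0 : (xs.drop (j+1))[0]? = some x := by rw [hd]; rfl
      rw [List.getElem?_drop] at h0
      simpa using h0
    have hd' : xs.drop (j+1+1) = t' := by
      have h1 := congrArg (List.drop 1) hd
      rw [List.drop_drop] at h1
      simpa using h1
    rw [PySem.List.len_eq, PySem.List.pyRange_one_cons (by omega)]
    rw [List.foldl_cons]
    have e1 : PySem.List.pyGetD xs ((j : Int) + 1) "" = x := by
      have h2 : ((j : Int) + 1) = ((j + 1 : Nat) : Int) := by push_cast; ring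
      rw [h2, PySem.List.pyGetD_natCast]
      simp [List.getD, hx]
    have e2 : PySem.List.pyGetD xs ((j : Int) + 1 - 1) "" = xs.getD j "" := by
      have h2 : ((j : Int) + 1 - 1) = ((j : Nat) : Int) := by ring
      rw [h2, PySem.List.pyGetD_natCast]
    have ihj := ih (j+1)
    rw [PySem.List.len_eq] at ihj
    have hgd : xs.getD (j+1) "" = x := by simp [List.getD, hx]
    by_cases hxe : x == xs.getD j ""
    · rw [if_pos (by rw [e1, e2]; exact hxe)]
      rw [e1]
      have hrec := ihj (st.1, st.2 ++ [x]) hjlt hd'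
      rw [show ((j + 1 : Nat) : Int) = (j : Int) + 1 by push_cast; ring] at hrec
      rw [hrec, hgd]
      have hxx : x = xs.getD j "" := by simpa using hxe
      rw [← hxx]
      simp [pvGo]
    · rw [if_neg (by rw [e1, e2]; exact hxe)]
      rw [e1]
      have hrec := ihj (st.1 ++ [st.2], [x]) hjlt hd'
      rw [show ((j + 1 : Nat) : Int) = (j : Int) + 1 by push_cast; ring] at hrec
      rw [hrec, hgd]
      simp only [pvGo]
      rw [if_neg (by simpa using hxe)]

theorem pvGoRender (rest : List String) :
    ∀ (prev : String) (cols : List (List String)) (cur : List String),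
      pvRenderCols ((pvGo (cols, cur ++ [prev]) prev rest).1 ++ [(pvGo (cols, cur ++ [prev]) prev rest).2])
        = pvRenderCols cols ++ ("<div class=\"road-column\">" ++ (pvCells cur ++ pvTail prev rest)) := by
  induction rest with
  | nil =>
    intro prev cols cur
    simp [pvGo, pvRenderCols_append, pvCells_append, pvTail, String.append_assoc]
  | cons x r ih =>
    intro prev cols cur
    by_cases hx : x == prev
    · have hxe : x = prev := by simpa using hx
      simp only [pvGo, hx, if_pos]
      have hrec := ih x cols (cur ++ [prev])
      rw [hxe] at hrec ⊢
      rw [hrec]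
      simp [pvTail, pvCells_append, String.append_assoc]
    · simp only [pvGo, hx, Bool.false_eq_true, if_false]
      have hrec := ih x (cols ++ [cur ++ [prev]]) []
      simp only [List.nil_append] at hrec
      rw [hrec]
      simp [pvTail, hx, pvRenderCols_append, pvCells_append, pvCells, pvSepAssoc, String.append_assoc]

theorem pvCellsFold (col : List String) :
    ∀ (h : String),
      col.foldl
        (fun html item =>
          html ++ ("<div class=\"circle-" ++ (if item == "P" then "p" else "b") ++ "\">" ++ item ++ "</div>")) h
      = h ++ pvCells col := by
  induction col with
  | nil => intro h; simp [pvCells]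
  | cons x xs ih =>
    intro h
    rw [List.foldl_cons, ih]
    simp [pvCells, pvCell, String.append_assoc]

theorem pvRenderFold (cols : List (List String)) :
    ∀ (acc : String),
      cols.foldl
        (fun html col =>
          (col.foldl
            (fun html item =>
              html ++ ("<div class=\"circle-" ++ (if item == "P" then "p" else "b") ++ "\">" ++ item ++ "</div>"))
            (html ++ "<div class=\"road-column\">")) ++ "</div>") acc
      = acc ++ pvRenderCols cols := by
  induction cols with
  | nil => intro acc; simp [pvRenderCols]
  | cons c cs ih =>
    intro acc
    rw [List.foldl_cons, ih, pvCellsFold]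
    simp [pvRenderCols, String.append_assoc]

theorem pvFoldB (rest : List String) :
    ∀ (prev : String) (acc : List String),
      pvCat (((prev :: rest).zip rest).foldl
          (fun (parts : List String) pc =>
            if pc.2 != pc.1 then
              parts ++ ["<div class=\"circle-" ++ (if pc.1 == "P" then "p" else "b") ++ "\">" ++ pc.1 ++ "</div>"]
                ++ ["</div><div class=\"road-column\">"]
            else
              parts ++ ["<div class=\"circle-" ++ (if pc.1 == "P" then "p" else "b") ++ "\">" ++ pc.1 ++ "</div>"]) acc)
        ++ (pvCell (rest.getLastD prev) ++ "</div></div>")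
      = pvCat acc ++ (pvTail prev rest ++ "</div>") := by
  induction rest with
  | nil =>
    intro prev acc
    have hsplit : ("</div></div>" : String) = "</div>" ++ "</div>" := rfl
    simp [pvTail, hsplit, String.append_assoc]
  | cons x r ih =>
    intro prev acc
    rw [List.getLastD_cons, List.zip_cons_cons, List.foldl_cons, ih x]
    by_cases hx : x == prev
    · have hbne : (x != prev) = false := by simp [bne, hx]
      simp [hbne, hx, pvTail, pvCat_append, pvCat_singleton, pvCell, String.append_assoc]
    · have hbne : (x != prev) = true := by simp [bne, hx]
      simp [hbne, hx, pvTail, pvCat_append, pvCat, pvCell, String.append_assoc]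
      conv_rhs => rw [← String.append_assoc]
      congr 1

theorem pvMain (h0 : String) (rest : List String) :
    get_big_road_html (h0 :: rest) = get_big_road_html_alt (h0 :: rest) := by
  have hA : get_big_road_html (h0 :: rest)
      = "<div class=\"road-wrapper\">" ++ ("<div class=\"road-column\">" ++ (pvTail h0 rest ++ "</div>")) := by
    simp only [get_big_road_html]
    have hfold := pvFoldIdx (h0 :: rest) rest 0 ([], [h0]) (by simp) (by simp)
    simp only [Nat.cast_zero, zero_add] at hfold
    rw [hfold]
    simp only [List.getD_cons_zero]
    rw [pvRenderFold]
    have hrend := pvGoRender rest h0 [] []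
    simp only [List.nil_append] at hrend
    rw [hrend]
    simp [pvRenderCols, pvCells, String.append_assoc]
  have hB : get_big_road_html_alt (h0 :: rest)
      = "<div class=\"road-wrapper\"><div class=\"road-column\">" ++ (pvTail h0 rest ++ "</div>") := by
    simp only [get_big_road_html_alt]
    rw [pvJoinEq, PySem.List.slice_from_one]
    simp only [List.tail_cons]
    rw [pvCat_append, pvCat_append, pvLast, pvCat_singleton, pvCat_singleton]
    have hcell : ("<div class=\"circle-" ++ (if rest.getLastD h0 == "P" then "p" else "b") ++ "\">" ++ rest.getLastD h0 ++ "</div>")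
        = pvCell (rest.getLastD h0) := rfl
    rw [hcell, String.append_assoc]
    rw [pvFoldB rest h0]
    rw [pvCat_singleton]
  rw [hA, hB, pvWrapAssoc]

-- ===== VERDICT (by name: the statement is the Claim_ definition above) =====
theorem get_big_road_html_spec : Claim_equal_get_big_road_html := by
  intro history _
  unfold Spec_get_big_road_html
  cases history with
  | nil => rfl
  | cons h0 rest => exact pvMain h0 rest
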